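-- pv_equiv track=rewrite | github.com/ngqhung0912/StackOverFlow-MBDProject | codes/metrics_calculator.py | syllable_count
-- ===== SOURCE A (Python) =====
-- def syllable_count(text):
--     count = 0
--     for word in text.split():
--         vowels = "aeiouy"
--         if word[0] in vowels:
--             count += 1
--         for index in range(1, len(word)):
--             if word[index] in vowels and word[index - 1] not in vowels:
--                 count += 1
--         if word.endswith("e"):
--             count -= 1
--         if word.endswith('le'):
--             count += 1
--         if count == 0:
--             count += 1
--     return count
-- ===== SOURCE B (Python) =====
-- def syllable_count(text):
--     count = 0
--     for word in text.split():
--         flags = [c in "aeiouy" for c in word]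
--         vowels = sum(flags)
--         pairs = sum(1 for a, b in zip(flags, flags[1:]) if a and b)
--         count += vowels - pairs
--         if word.endswith("e"):
--             count -= 1
--         if word.endswith("le"):
--             count += 1
--         if count == 0:
--             count = 1
--     return count
-- ===== Notes on version B (the rewrite author's own statement) =====
-- stated objective: alternative
-- what changed: A's positional transition scan (first-char test plus an index loop testing word[i] vowel and word[i-1] non-vowel) is replaced by an inclusion-exclusion count: a staged flags list, then groups = #vowels - #adjacent vowel pairs, with no per-character state or index arithmetic; the word loop, endswith adjustments and the cumulative count==0 fix-up keep A's order.
import Mathlib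
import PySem

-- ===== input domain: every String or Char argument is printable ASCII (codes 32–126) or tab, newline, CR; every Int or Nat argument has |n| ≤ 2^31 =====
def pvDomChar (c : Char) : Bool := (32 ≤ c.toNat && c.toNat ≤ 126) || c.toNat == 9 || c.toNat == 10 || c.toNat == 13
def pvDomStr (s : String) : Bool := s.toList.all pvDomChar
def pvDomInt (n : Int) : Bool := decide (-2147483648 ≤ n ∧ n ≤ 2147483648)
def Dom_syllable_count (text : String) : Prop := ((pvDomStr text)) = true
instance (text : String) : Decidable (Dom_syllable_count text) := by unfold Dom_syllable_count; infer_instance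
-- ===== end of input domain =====

-- B replaces A's positional transition scan by an inclusion-exclusion count per word:
-- groups = #vowel chars − #adjacent vowel pairs, from a staged flags list (same cost, no per-char state).

-- ===== PORT A =====
-- shared vowel test, 'c in "aeiouy"' in both Pythons
def pvIsVowel (c : Char) : Bool := decide (c ∈ "aeiouy".toList)

def syllable_count (text : String) : Int :=
  (PySem.Chars.split₀ text.toList).foldl (fun count word =>
    let count := if (PySem.List.pyGet? word 0).any pvIsVowel then count + 1 else count
    -- 'word[0]' raises on an empty word, but str.split() never yields one; '.any' is only a totality guard
    let count := (PySem.List.pyRange 1 (word.length : Int) 1).foldl (fun cnt index =>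
        if (PySem.List.pyGet? word index).any pvIsVowel &&
           !((PySem.List.pyGet? word (index - 1)).any pvIsVowel)
        then cnt + 1 else cnt) count
    let count := if PySem.Chars.endswith word ['e'] then count - 1 else count
    let count := if PySem.Chars.endswith word ['l', 'e'] then count + 1 else count
    if count == 0 then count + 1 else count) 0

-- ===== PORT B =====
def syllable_count_alt (text : String) : Int :=
  (PySem.Chars.split₀ text.toList).foldl (fun count word =>
    let flags := word.map pvIsVowel
    let vowels : Int := ((flags.filter id).length : Int)
    let pairs : Int := (((flags.zip flags.tail).filter (fun p => p.1 && p.2)).length : Int)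
    let count := count + (vowels - pairs)
    let count := if PySem.Chars.endswith word ['e'] then count - 1 else count
    let count := if PySem.Chars.endswith word ['l', 'e'] then count + 1 else count
    if count == 0 then 1 else count) 0

-- ===== PRECONDITION & SPEC =====
def Spec_syllable_count (text : String) (out : Int) : Prop := out = syllable_count_alt text
instance (text : String) (out : Int) : Decidable (Spec_syllable_count text out) := by unfold Spec_syllable_count; infer_instance

-- ===== CLAIM (what is proved, stated in full; the proofs are below) =====
def Claim_equal_syllable_count : Prop := ∀ (text : String), Dom_syllable_count text → Spec_syllable_count text (syllable_count text)

-- ===== LEMMAS AND PROOFS =====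

-- B's per-word value: #vowels − #adjacent vowel pairs (exactly the flags/zip expressions of the port)
def pvGC (w : List Char) : Int :=
  (((w.map pvIsVowel).filter id).length : Int) -
  ((((w.map pvIsVowel).zip (w.map pvIsVowel).tail).filter (fun p => p.1 && p.2)).length : Int)

-- state-passing transition scan: +1 exactly when a vowel follows a non-vowel state
def pvScan : Bool → List Char → Int
  | _, [] => 0
  | b, c :: r => (if pvIsVowel c && !b then 1 else 0) + pvScan (pvIsVowel c) r

lemma pvGC_cons (c : Char) (r : List Char) :
    pvGC (c :: r) = (if pvIsVowel c then 1 else 0)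
      - (if pvIsVowel c && (r.head?.any pvIsVowel) then 1 else 0) + pvGC r := by
  cases r with
  | nil => by_cases h : pvIsVowel c = true <;> simp [pvGC, h]
  | cons d r' =>
    by_cases hc : pvIsVowel c = true <;> by_cases hd : pvIsVowel d = true <;>
      simp [pvGC, hc, hd] <;> omega

lemma pvScan_gc : ∀ (w : List Char) (b : Bool),
    pvScan b w = pvGC w - (if b && (w.head?.any pvIsVowel) then 1 else 0) := by
  intro w
  induction w with
  | nil => intro b; simp [pvScan, pvGC]
  | cons c r ih =>
    intro b
    rw [pvScan, ih (pvIsVowel c), pvGC_cons]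
    by_cases hc : pvIsVowel c = true <;> by_cases hb : b = true <;> simp [hc, hb] <;> omega

lemma pvIdxFold (rest : List Char) : ∀ (pre : List Char) (hpre : pre ≠ []) (count : Int),
    (PySem.List.pyRange (pre.length : Int) ((pre.length : Int) + (rest.length : Int)) 1).foldl
      (fun cnt index =>
        if (PySem.List.pyGet? (pre ++ rest) index).any pvIsVowel &&
           !((PySem.List.pyGet? (pre ++ rest) (index - 1)).any pvIsVowel)
        then cnt + 1 else cnt) count
    = count + pvScan (pvIsVowel (pre.getLast hpre)) rest := by
  induction rest with
  | nil =>
    intro pre hpre count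
    rw [show ((pre.length : Int) + (([] : List Char).length : Int)) = (pre.length : Int) by simp,
        PySem.List.pyRange_one_eq_nil (le_refl _)]
    simp [pvScan]
  | cons d r ih =>
    intro pre hpre count
    have hlt : (pre.length : Int) < (pre.length : Int) + ((d :: r).length : Int) := by
      have : 0 < (d :: r).length := by simp
      omega
    rw [PySem.List.pyRange_one_cons hlt, List.foldl_cons]
    have hget : PySem.List.pyGet? (pre ++ d :: r) (pre.length : Int) = some d :=
      PySem.List.pyGet?_append_length pre r d
    have hsplit : pre ++ d :: r = pre.dropLast ++ (pre.getLast hpre) :: (d :: r) := by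
      conv_lhs => rw [← List.dropLast_append_getLast hpre]
      simp
    have hcast : ((pre.length : Int) - 1) = ((pre.dropLast.length : Nat) : Int) := by
      have := List.length_pos_of_ne_nil hpre
      simp [List.length_dropLast]; omega
    have hprev : PySem.List.pyGet? (pre ++ d :: r) ((pre.length : Int) - 1)
        = some (pre.getLast hpre) := by
      rw [hcast, hsplit]
      exact PySem.List.pyGet?_append_length _ _ _
    have hpre' : pre ++ [d] ≠ [] := by simp
    have hbound : (pre.length : Int) + ((d :: r).length : Int)
        = (((pre ++ [d]).length : Nat) : Int) + ((r.length : Nat) : Int) := by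
      simp; omega
    have hword : pre ++ d :: r = (pre ++ [d]) ++ r := by simp
    have hplus : ((pre.length : Int) + 1) = (((pre ++ [d]).length : Nat) : Int) := by simp
    rw [hget, hprev]
    simp only [Option.any_some]
    rw [hbound, hplus, hword, ih (pre ++ [d]) hpre']
    have hlast : (pre ++ [d]).getLast hpre' = d := by simp
    rw [hlast, pvScan]
    by_cases hv : (pvIsVowel d && !pvIsVowel (pre.getLast hpre)) = true
    · rw [if_pos hv, if_pos hv]; omega
    · rw [if_neg hv, if_neg hv]; omega

-- per-word: A's first-char test plus index loop = B's inclusion-exclusion count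
lemma pvWord_eq (w : List Char) (count : Int) :
    (PySem.List.pyRange 1 (w.length : Int) 1).foldl
      (fun cnt index =>
        if (PySem.List.pyGet? w index).any pvIsVowel &&
           !((PySem.List.pyGet? w (index - 1)).any pvIsVowel)
        then cnt + 1 else cnt)
      (if (PySem.List.pyGet? w 0).any pvIsVowel then count + 1 else count)
    = count + pvGC w := by
  cases w with
  | nil =>
    rw [show ((([] : List Char).length : Nat) : Int) = 0 by simp,
        PySem.List.pyRange_one_eq_nil (by omega)]
    simp [PySem.List.pyGet?, pvGC]
  | cons c rest =>
    have H := pvIdxFold rest [c] (by simp)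
      (if (PySem.List.pyGet? (c :: rest) 0).any pvIsVowel then count + 1 else count)
    simp only [List.length_singleton, Nat.cast_one, List.singleton_append,
      List.getLast_singleton] at H
    rw [show (((c :: rest).length : Nat) : Int) = 1 + (rest.length : Int) by
      push_cast [List.length_cons]; ring]
    refine H.trans ?_
    rw [PySem.List.pyGet?_zero_cons c rest, Option.any_some,
        pvScan_gc rest (pvIsVowel c), pvGC_cons]
    by_cases hc : pvIsVowel c = true <;>
      by_cases hr : (rest.head?.any pvIsVowel) = true <;> simp [hc, hr] <;> omega

lemma pvFold_eq (words : List (List Char)) : ∀ (count : Int),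
    words.foldl (fun count word =>
      let count := if (PySem.List.pyGet? word 0).any pvIsVowel then count + 1 else count
      let count := (PySem.List.pyRange 1 (word.length : Int) 1).foldl (fun cnt index =>
          if (PySem.List.pyGet? word index).any pvIsVowel &&
             !((PySem.List.pyGet? word (index - 1)).any pvIsVowel)
          then cnt + 1 else cnt) count
      let count := if PySem.Chars.endswith word ['e'] then count - 1 else count
      let count := if PySem.Chars.endswith word ['l', 'e'] then count + 1 else count
      if count == 0 then count + 1 else count) count
    = words.foldl (fun count word =>
      let flags := word.map pvIsVowel
      let vowels : Int := ((flags.filter id).length : Int)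
      let pairs : Int := (((flags.zip flags.tail).filter (fun p => p.1 && p.2)).length : Int)
      let count := count + (vowels - pairs)
      let count := if PySem.Chars.endswith word ['e'] then count - 1 else count
      let count := if PySem.Chars.endswith word ['l', 'e'] then count + 1 else count
      if count == 0 then 1 else count) count := by
  induction words with
  | nil => intro count; rfl
  | cons w ws ih =>
    intro count
    simp only [List.foldl_cons]
    rw [pvWord_eq w count]
    have hgc : count + pvGC w
        = count + ((((w.map pvIsVowel).filter id).length : Int)
          - ((((w.map pvIsVowel).zip (w.map pvIsVowel).tail).filter
              (fun p => p.1 && p.2)).length : Int)) := by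
      rw [pvGC]
    rw [hgc]
    set c1 := count + ((((w.map pvIsVowel).filter id).length : Int)
      - ((((w.map pvIsVowel).zip (w.map pvIsVowel).tail).filter
          (fun p => p.1 && p.2)).length : Int)) with hc1
    set c2 := if PySem.Chars.endswith w ['e'] then c1 - 1 else c1 with hc2
    set c3 := if PySem.Chars.endswith w ['l', 'e'] then c2 + 1 else c2 with hc3
    have : (if c3 == 0 then c3 + 1 else c3) = (if c3 == 0 then 1 else c3) := by
      by_cases h : c3 = 0 <;> simp [h]
    rw [this, ih]

-- ===== VERDICT (by name: the statement is the Claim_ definition above) =====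
theorem syllable_count_spec : Claim_equal_syllable_count := by
  intro text _
  unfold Spec_syllable_count syllable_count syllable_count_alt
  exact pvFold_eq (PySem.Chars.split₀ text.toList) 0
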